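-- pv_equiv track=rewrite | github.com/bitgineer/Speakeasy | test_slash_search.py | highlight_matches
-- ===== SOURCE A (Python) =====
-- def highlight_matches(text: str, query: str) -> str:
--     """Highlight matched terms in text."""
--     if not query:
--         return text
--
--     text_lower = text.lower()
--     query_lower = query.lower()
--
--     # Find all query terms
--     query_terms = query_lower.split()
--
--     # Track which positions to highlight
--     highlight_positions = set()
--
--     for term in query_terms:
--         start = 0
--         while True:
--             pos = text_lower.find(term, start)
--             if pos == -1:
--                 break
--             for i in range(pos, pos + len(term)):
--                 highlight_positions.add(i)
--             start = pos + 1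
--
--     # Build highlighted string
--     result = []
--     i = 0
--     in_highlight = False
--
--     while i < len(text):
--         if i in highlight_positions:
--             if not in_highlight:
--                 result.append("**")
--                 in_highlight = True
--             result.append(text[i])
--         else:
--             if in_highlight:
--                 result.append("**")
--                 in_highlight = False
--             result.append(text[i])
--         i += 1
--
--     if in_highlight:
--         result.append("**")
--
--     return "".join(result)
-- ===== SOURCE B (Python) =====
-- def highlight_matches(text: str, query: str) -> str:
--     """Highlight matched terms in text (difference-array re-implementation)."""
--     if not query:
--         return text
--
--     text_lower = text.lower()
--     n = len(text)
--
--     # Difference array of coverage events: +1 where a match starts, -1 just past its end.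
--     delta = [0] * (n + 1)
--     for term in query.lower().split():
--         m = len(term)
--         pos = text_lower.find(term)
--         while pos != -1:
--             delta[pos] += 1
--             delta[pos + m] -= 1
--             pos = text_lower.find(term, pos + 1)
--
--     # Running prefix sum of delta tells whether each position is covered.
--     out = []
--     cover = 0
--     prev = False
--     for i in range(n):
--         cover += delta[i]
--         cur = cover > 0
--         if cur != prev:
--             out.append("**")
--         out.append(text[i])
--         prev = cur
--     if prev:
--         out.append("**")
--     return "".join(out)
-- ===== Notes on version B (the rewrite author's own statement) =====
-- stated objective: faster
-- what changed: B replaces A's hash-set of every highlighted position (one set.add per covered character and one set lookup per output character) with a difference array of +1/-1 coverage events per match and a running prefix-sum counter while emitting the output.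
import Mathlib
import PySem

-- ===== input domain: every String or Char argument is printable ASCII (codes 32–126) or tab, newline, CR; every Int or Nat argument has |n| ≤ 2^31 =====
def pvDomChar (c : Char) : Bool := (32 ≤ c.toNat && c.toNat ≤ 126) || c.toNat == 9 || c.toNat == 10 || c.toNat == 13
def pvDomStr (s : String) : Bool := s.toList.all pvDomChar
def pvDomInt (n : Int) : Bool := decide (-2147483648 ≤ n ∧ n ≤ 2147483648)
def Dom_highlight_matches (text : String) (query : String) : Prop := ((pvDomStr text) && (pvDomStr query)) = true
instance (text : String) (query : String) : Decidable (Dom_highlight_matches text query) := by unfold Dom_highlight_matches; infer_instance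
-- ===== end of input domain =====

-- B replaces A's set of every highlighted position by per-match +1/-1 difference-array events
-- and a running prefix-sum counter during output emission (a constant-factor speed-up in Python).

-- start past the end of the string: Python's str.find returns -1 (needed for both ports' termination)
theorem pvFindFrom_of_gt (sl term : List Char) (start : Nat) (hk : sl.length < start) :
    PySem.Chars.findFrom sl term (start : Int) = -1 := by
  simp only [PySem.Chars.findFrom]
  have h1 : ¬ ((start : Int) < 0) := by omega
  simp only [if_neg h1]
  rw [if_pos (by exact_mod_cast hk)]

-- ===== PORT A =====
-- inner `while True:` loop of A: find each occurrence of `term` from `start` on,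
-- add all covered positions to the set `S`
def hlMark (sl term : List Char) (start : Nat) (S : PySem.Set Int) : PySem.Set Int :=
  let pos := PySem.Chars.findFrom sl term (start : Int)
  if pos = -1 then S
  else
    let S' := (PySem.List.pyRange pos (pos + term.length)).foldl PySem.Set.add S
    hlMark sl term (pos.toNat + 1) S'
termination_by sl.length + 1 - start
decreasing_by
  rename_i hpos
  simp only [pos] at *
  by_cases hk : start ≤ sl.length
  · have hspec := PySem.Chars.findFrom_natCast_spec sl term start hk hpos
    omega
  · exact absurd (pvFindFrom_of_gt sl term start (by omega)) hpos

-- A's output loop: `while i < len(text)` with the `in_highlight` flag and set-membership tests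
def hlBuild (s : List Char) (S : PySem.Set Int) (i : Nat) (inH : Bool) (result : List (List Char)) :
    List (List Char) :=
  if h : i < s.length then
    if (i : Int) ∈ S then
      if !inH then hlBuild s S (i+1) true (result ++ [['*','*'], [s[i]]])
      else hlBuild s S (i+1) inH (result ++ [[s[i]]])
    else
      if inH then hlBuild s S (i+1) false (result ++ [['*','*'], [s[i]]])
      else hlBuild s S (i+1) inH (result ++ [[s[i]]])
  else if inH then result ++ [['*','*']] else result
termination_by s.length - i

def highlight_matches (text : String) (query : String) : String :=
  if query.toList.isEmpty then text
  else
    let s := text.toList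
    let sl := PySem.Chars.lower s
    let ql := PySem.Chars.lower query.toList
    let terms := PySem.Chars.split₀ ql
    let S := terms.foldl (fun S t => hlMark sl t 0 S) (PySem.Set.ofList [])
    String.ofList (PySem.Chars.join [] (hlBuild s S 0 false []))

-- ===== PORT B =====
-- B's inner find loop: record a +1 event where a match starts and a -1 event just past its end
def hlDelta (sl term : List Char) (start : Nat) (delta : List Int) : List Int :=
  let pos := PySem.Chars.findFrom sl term (start : Int)
  if pos = -1 then delta
  else
    let j := pos.toNat
    let d1 := delta.set j (delta.getD j 0 + 1)
    let d2 := d1.set (j + term.length) (d1.getD (j + term.length) 0 - 1)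
    hlDelta sl term (j + 1) d2
termination_by sl.length + 1 - start
decreasing_by
  rename_i hpos
  simp only [pos] at *
  by_cases hk : start ≤ sl.length
  · have hspec := PySem.Chars.findFrom_natCast_spec sl term start hk hpos
    omega
  · exact absurd (pvFindFrom_of_gt sl term start (by omega)) hpos

-- B's output loop: running prefix sum `cover` of the difference array; `**` at every flip
def hlEmit (s : List Char) (delta : List Int) (i : Nat) (cover : Int) (prev : Bool)
    (out : List (List Char)) : List (List Char) :=
  if h : i < s.length then
    let cover' := cover + delta.getD i 0
    let cur := decide (0 < cover')
    let out' := if cur != prev then out ++ [['*','*']] else out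
    hlEmit s delta (i+1) cover' cur (out' ++ [[s[i]]])
  else if prev then out ++ [['*','*']] else out
termination_by s.length - i

def highlight_matches_alt (text : String) (query : String) : String :=
  if query.toList.isEmpty then text
  else
    let s := text.toList
    let sl := PySem.Chars.lower s
    let terms := PySem.Chars.split₀ (PySem.Chars.lower query.toList)
    let delta := terms.foldl (fun d t => hlDelta sl t 0 d) (List.replicate (s.length + 1) 0)
    String.ofList (PySem.Chars.join [] (hlEmit s delta 0 0 false []))

-- ===== PRECONDITION & SPEC =====
def Spec_highlight_matches (text : String) (query : String) (out : String) : Prop := out = highlight_matches_alt text query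
instance (text : String) (query : String) (out : String) : Decidable (Spec_highlight_matches text query out) := by unfold Spec_highlight_matches; infer_instance

-- ===== CLAIM (what is proved, stated in full; the proofs are below) =====
def Claim_equal_highlight_matches : Prop := ∀ (text : String) (query : String), Dom_highlight_matches text query → Spec_highlight_matches text query (highlight_matches text query)

-- ===== LEMMAS AND PROOFS =====

theorem pvFindFrom_le (sl term : List Char) (start : Nat) (hk : start ≤ sl.length) :
    PySem.Chars.findFrom sl term (start : Int) ≤ sl.length := by
  rw [PySem.Chars.findFrom_natCast sl term start hk]
  have h1 := PySem.Chars.find_le_length (List.drop start sl) term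
  have h2 : (List.drop start sl).length = sl.length - start := List.length_drop ..
  split
  · omega
  · rw [h2] at h1; omega

-- prefix sum of the first k entries of the difference array
def sumTake (d : List Int) (k : Nat) : Int := (d.take k).sum

theorem sumTake_succ (d : List Int) (i : Nat) :
    sumTake d (i+1) = sumTake d i + d.getD i 0 := by
  induction d generalizing i with
  | nil => simp [sumTake]
  | cons x xs ih =>
    cases i with
    | zero => simp [sumTake]
    | succ i =>
      simp only [sumTake, List.take_succ_cons, List.sum_cons, List.getD_cons_succ] at *
      rw [ih]; ring

theorem sumTake_set (d : List Int) (a : Nat) (v : Int) (k : Nat) (ha : a < d.length) :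
    sumTake (d.set a v) k = sumTake d k + (if a < k then v - d.getD a 0 else 0) := by
  induction d generalizing a k with
  | nil => simp at ha
  | cons x xs ih =>
    cases a with
    | zero =>
      cases k with
      | zero => simp [sumTake]
      | succ k => simp [sumTake]; ring
    | succ a =>
      cases k with
      | zero => simp [sumTake]
      | succ k =>
        simp only [List.set_cons_succ, sumTake, List.take_succ_cons, List.sum_cons,
          List.getD_cons_succ] at *
        rw [ih a k (by simpa using ha)]
        simp only [Nat.add_lt_add_iff_right]
        ring

theorem sumTake_replicate (n k : Nat) : sumTake (List.replicate n (0:Int)) k = 0 := by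
  simp [sumTake, List.take_replicate]

theorem mem_foldl_add (l : List Int) : ∀ (S : PySem.Set Int) (x : Int),
    x ∈ l.foldl PySem.Set.add S ↔ x ∈ S ∨ x ∈ l := by
  induction l with
  | nil => simp
  | cons y ys ih =>
    intro S x
    simp only [List.foldl_cons, ih, PySem.Set.mem_add, List.mem_cons]
    tauto

theorem hlDelta_length (sl term : List Char) (start : Nat) (d : List Int) :
    (hlDelta sl term start d).length = d.length := by
  induction start, d using hlDelta.induct sl term with
  | case1 start d pos hpos =>
    have hp : PySem.Chars.findFrom sl term ↑start = -1 := hpos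
    rw [hlDelta, if_pos hp]
  | case2 start d pos hpos j d1 d2 ih =>
    have hp : ¬ PySem.Chars.findFrom sl term ↑start = -1 := hpos
    rw [hlDelta, if_neg hp]
    exact ih.trans (by simp [d2, d1])

-- effect of one +1/-1 event pair on a prefix sum
theorem sumTake_event (d : List Int) (j m i n : Nat) (hd : d.length = n + 1)
    (hjm : j + m ≤ n) (_hi : i < n) :
    sumTake ((d.set j (d.getD j 0 + 1)).set (j + m)
        ((d.set j (d.getD j 0 + 1)).getD (j + m) 0 - 1)) (i+1)
      = sumTake d (i+1) + (if j ≤ i ∧ i < j + m then 1 else 0) := by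
  rw [sumTake_set _ _ _ _ (by simp; omega), sumTake_set _ _ _ _ (by omega)]
  split_ifs <;> ring_nf <;> omega

-- joint invariant of A's set loop and B's event loop: a position ends up in the set
-- exactly when the loop strictly increases its prefix sum; prefix sums never decrease
theorem mark_delta (sl term : List Char) : ∀ (start : Nat) (S : PySem.Set Int),
    ∀ (d : List Int), d.length = sl.length + 1 → ∀ i : Nat, i < sl.length →
      (((i:Int) ∈ hlMark sl term start S ↔
          (i:Int) ∈ S ∨ sumTake d (i+1) < sumTake (hlDelta sl term start d) (i+1))
        ∧ sumTake d (i+1) ≤ sumTake (hlDelta sl term start d) (i+1)) := by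
  intro start S
  induction start, S using hlMark.induct sl term with
  | case1 start S pos hpos =>
    intro d hd i hi
    have hp : PySem.Chars.findFrom sl term ↑start = -1 := hpos
    rw [hlMark, if_pos hp, hlDelta, if_pos hp]
    refine ⟨⟨fun h => Or.inl h, ?_⟩, le_refl _⟩
    rintro (h | h)
    · exact h
    · exact absurd h (lt_irrefl _)
  | case2 start S pos hpos S' ih =>
    intro d hd i hi
    have hp : ¬ PySem.Chars.findFrom sl term ↑start = -1 := hpos
    have hk : start ≤ sl.length := by
      by_contra hk
      exact hp (pvFindFrom_of_gt sl term start (by omega))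
    have hspec := PySem.Chars.findFrom_natCast_spec sl term start hk hp
    have hub := pvFindFrom_le sl term start hk
    have hjm : (PySem.Chars.findFrom sl term ↑start).toNat + term.length ≤ sl.length := by
      have h1 := hspec.2.1.length_le
      simp only [List.length_drop] at h1
      omega
    have h0 : (0:Int) ≤ PySem.Chars.findFrom sl term ↑start :=
      le_trans (by omega) hspec.1
    set j := (PySem.Chars.findFrom sl term ↑start).toNat with hjdef
    have hj : (j : Int) = PySem.Chars.findFrom sl term ↑start := Int.toNat_of_nonneg h0
    set d1 := d.set j (d.getD j 0 + 1) with hd1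
    set d2 := d1.set (j + term.length) (d1.getD (j + term.length) 0 - 1) with hd2
    have hmark : hlMark sl term start S =
        hlMark sl term (j + 1) ((PySem.List.pyRange (PySem.Chars.findFrom sl term ↑start)
          (PySem.Chars.findFrom sl term ↑start + term.length)).foldl PySem.Set.add S) := by
      rw [hlMark, if_neg hp]
    have hdelta : hlDelta sl term start d = hlDelta sl term (j + 1) d2 := by
      rw [hlDelta, if_neg hp]
    have hd2len : d2.length = sl.length + 1 := by simp [hd2, hd1, hd]
    have hevent : sumTake d2 (i+1)
        = sumTake d (i+1) + (if j ≤ i ∧ i < j + term.length then 1 else 0) :=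
      sumTake_event d j term.length i sl.length hd hjm hi
    have ihh := ih d2 hd2len i hi
    have hS' : ((i:Int) ∈ (PySem.List.pyRange (PySem.Chars.findFrom sl term ↑start)
          (PySem.Chars.findFrom sl term ↑start + term.length)).foldl PySem.Set.add S)
        ↔ ((i:Int) ∈ S ∨ (j ≤ i ∧ i < j + term.length)) := by
      rw [mem_foldl_add, PySem.List.mem_pyRange_one]
      constructor
      · rintro (h | h)
        · exact Or.inl h
        · exact Or.inr (by omega)
      · rintro (h | h)
        · exact Or.inl h
        · exact Or.inr ⟨by omega, by omega⟩
    rw [hmark, hdelta]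
    rcases ihh with ⟨ihm, ihle⟩
    rw [hS'] at ihm
    constructor
    · rw [ihm]
      by_cases hcov : j ≤ i ∧ i < j + term.length
      · rw [if_pos hcov] at hevent
        constructor
        · intro _; right; omega
        · intro _; tauto
      · rw [if_neg hcov] at hevent
        constructor
        · rintro ((h | h) | h)
          · exact Or.inl h
          · exact absurd h hcov
          · right; omega
        · rintro (h | h)
          · exact Or.inl (Or.inl h)
          · right; omega
    · split_ifs at hevent <;> omega

-- lifting mark_delta over the fold across all query terms
theorem fold_mark_delta (sl : List Char) (terms : List (List Char)) :
    ∀ (S : PySem.Set Int) (d : List Int), d.length = sl.length + 1 → ∀ i : Nat, i < sl.length →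
      (((i:Int) ∈ terms.foldl (fun S t => hlMark sl t 0 S) S ↔
          (i:Int) ∈ S ∨ sumTake d (i+1) < sumTake (terms.foldl (fun d t => hlDelta sl t 0 d) d) (i+1))
        ∧ sumTake d (i+1) ≤ sumTake (terms.foldl (fun d t => hlDelta sl t 0 d) d) (i+1)) := by
  induction terms with
  | nil =>
    intro S d hd i hi
    constructor
    · simp only [List.foldl_nil]
      refine ⟨fun h => Or.inl h, ?_⟩
      rintro (h | h)
      · exact h
      · exact absurd h (lt_irrefl _)
    · simp
  | cons t ts ih =>
    intro S d hd i hi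
    simp only [List.foldl_cons]
    have h1 := mark_delta sl t 0 S d hd i hi
    have hd' : (hlDelta sl t 0 d).length = sl.length + 1 := by
      rw [hlDelta_length]; exact hd
    have h2 := ih (hlMark sl t 0 S) (hlDelta sl t 0 d) hd' i hi
    rcases h1 with ⟨h1m, h1le⟩
    rcases h2 with ⟨h2m, h2le⟩
    constructor
    · rw [h2m, h1m]
      constructor
      · rintro ((h | h) | h)
        · exact Or.inl h
        · right; omega
        · right; omega
      · rintro (h | h)
        · exact Or.inl (Or.inl h)
        · by_cases hlt : sumTake d (i+1) < sumTake (hlDelta sl t 0 d) (i+1)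
          · exact Or.inl (Or.inr hlt)
          · right; omega
    · omega

-- the two output loops produce the same pieces when set membership matches positive prefix sums
theorem build_emit (s : List Char) (S : PySem.Set Int) (delta : List Int)
    (hmask : ∀ k : Nat, k < s.length → ((k:Int) ∈ S ↔ 0 < sumTake delta (k+1))) :
    ∀ (m i : Nat), s.length - i ≤ m → ∀ (b : Bool) (out : List (List Char)),
      hlBuild s S i b out = hlEmit s delta i (sumTake delta i) b out := by
  intro m
  induction m with
  | zero =>
    intro i hi b out
    have h : ¬ i < s.length := by omega
    rw [hlBuild, hlEmit, dif_neg h, dif_neg h]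
  | succ m ih =>
    intro i hi b out
    by_cases h : i < s.length
    · have hc : sumTake delta i + delta.getD i 0 = sumTake delta (i+1) := (sumTake_succ ..).symm
      have hm := hmask i h
      by_cases hmem : ((i:Int) ∈ S) <;> cases b
      · -- entering a highlight
        have hcur : decide (0 < sumTake delta (i+1)) = true := by simpa using hm.mp hmem
        rw [hlBuild, dif_pos h, if_pos hmem, hlEmit, dif_pos h]
        simp only [hc, hcur, Bool.not_false, if_pos, bne_iff_ne, ne_eq, Bool.true_eq_false,
          not_false_eq_true]
        rw [ih (i+1) (by omega) true]
        simp [List.append_assoc]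
      · -- staying inside a highlight
        have hcur : decide (0 < sumTake delta (i+1)) = true := by simpa using hm.mp hmem
        rw [hlBuild, dif_pos h, if_pos hmem, hlEmit, dif_pos h]
        simp only [hc, hcur, Bool.not_true, if_neg, Bool.false_eq_true, not_false_eq_true,
          bne_self_eq_false]
        rw [ih (i+1) (by omega) true]
      · -- staying outside a highlight
        have hcur' : decide (0 < sumTake delta (i+1)) = false := by
          by_contra hb
          exact hmem (hm.mpr (by simpa using hb))
        rw [hlBuild, dif_pos h, if_neg hmem, hlEmit, dif_pos h]
        simp only [hc, hcur', if_neg, Bool.false_eq_true, not_false_eq_true,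
          bne_self_eq_false]
        rw [ih (i+1) (by omega) false]
      · -- leaving a highlight
        have hcur' : decide (0 < sumTake delta (i+1)) = false := by
          by_contra hb
          exact hmem (hm.mpr (by simpa using hb))
        rw [hlBuild, dif_pos h, if_neg hmem, hlEmit, dif_pos h]
        simp only [hc, hcur', if_pos, bne_iff_ne, ne_eq, Bool.false_eq_true, Bool.false_eq_true,
          not_false_eq_true]
        rw [ih (i+1) (by omega) false]
        simp [List.append_assoc]
    · rw [hlBuild, hlEmit, dif_neg h, dif_neg h]

-- final mask agreement: the fold over all terms starting from the empty set / all-zero array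
theorem mask_agree (text query : String) (k : Nat) (hk : k < text.toList.length) :
    ((k:Int) ∈ (PySem.Chars.split₀ (PySem.Chars.lower query.toList)).foldl
        (fun S t => hlMark (PySem.Chars.lower text.toList) t 0 S) (PySem.Set.ofList [])
      ↔ 0 < sumTake ((PySem.Chars.split₀ (PySem.Chars.lower query.toList)).foldl
        (fun d t => hlDelta (PySem.Chars.lower text.toList) t 0 d)
        (List.replicate (text.toList.length + 1) 0)) (k+1)) := by
  have hsl : (PySem.Chars.lower text.toList).length = text.toList.length := by
    simp [PySem.Chars.lower]
  have h := (fold_mark_delta (PySem.Chars.lower text.toList)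
      (PySem.Chars.split₀ (PySem.Chars.lower query.toList)) (PySem.Set.ofList [])
      (List.replicate (text.toList.length + 1) 0) (by simp [hsl]) k (by omega)).1
  rw [h, sumTake_replicate]
  constructor
  · rintro (hmem | hlt)
    · exact absurd hmem (by simp [PySem.Set.ofList])
    · exact hlt
  · exact fun hlt => Or.inr hlt

-- ===== VERDICT (by name: the statement is the Claim_ definition above) =====
theorem highlight_matches_spec : Claim_equal_highlight_matches := by
  unfold Claim_equal_highlight_matches Spec_highlight_matches
  intro text query _hdom
  unfold highlight_matches highlight_matches_alt
  by_cases hq : query.toList.isEmpty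
  · rw [if_pos hq, if_pos hq]
  · rw [if_neg hq, if_neg hq]
    refine congrArg String.ofList (congrArg (PySem.Chars.join []) ?_)
    have hb := build_emit text.toList
      ((PySem.Chars.split₀ (PySem.Chars.lower query.toList)).foldl
        (fun S t => hlMark (PySem.Chars.lower text.toList) t 0 S) (PySem.Set.ofList []))
      ((PySem.Chars.split₀ (PySem.Chars.lower query.toList)).foldl
        (fun d t => hlDelta (PySem.Chars.lower text.toList) t 0 d)
        (List.replicate (text.toList.length + 1) 0))
      (fun k hk => mask_agree text query k hk)
      text.toList.length 0 (by omega) false []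
    simpa [sumTake] using hb
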